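-- pv_equiv track=rewrite | github.com/MuhammadAbdullahWarraich/prompt-testing | chunkerizer.py | chunkerize_file
-- ===== SOURCE A (Python) =====
-- def chunkerize_file(file_content: list[str], chunk_size: int = 3) -> list[tuple[list[str], str]]:
--     assert chunk_size > 1
--     chunks = []
--     idx = 0
--     while idx < len(file_content):
--         end = min(idx + chunk_size, len(file_content))
--         chunks.append(file_content[idx:end])
--         idx = end
--     for i in range(0, len(chunks)):
--         if len(chunks[i]) < chunk_size:
--             assert i+1 == len(chunks)
--             chunks.pop(i)
--             break
--         target = chunks[i][-1]
--         chunks[i] = (chunks[i][:-1], target)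
--     return chunks
-- ===== SOURCE B (Python) =====
-- def chunkerize_file(file_content: list[str], chunk_size: int = 3) -> list[tuple[list[str], str]]:
--     assert chunk_size > 1
--     n = len(file_content) // chunk_size
--     return [(file_content[i * chunk_size:(i + 1) * chunk_size - 1],
--              file_content[(i + 1) * chunk_size - 1])
--             for i in range(n)]
-- ===== Notes on version B (the rewrite author's own statement) =====
-- stated objective: simpler
-- what changed: B computes the number of full chunks arithmetically (len // chunk_size) and emits each (prefix, target) pair by direct slicing in one comprehension, instead of A's two-pass build-all-chunks-then-mutate-and-pop-the-trailing-partial-chunk loop.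
import Mathlib
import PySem

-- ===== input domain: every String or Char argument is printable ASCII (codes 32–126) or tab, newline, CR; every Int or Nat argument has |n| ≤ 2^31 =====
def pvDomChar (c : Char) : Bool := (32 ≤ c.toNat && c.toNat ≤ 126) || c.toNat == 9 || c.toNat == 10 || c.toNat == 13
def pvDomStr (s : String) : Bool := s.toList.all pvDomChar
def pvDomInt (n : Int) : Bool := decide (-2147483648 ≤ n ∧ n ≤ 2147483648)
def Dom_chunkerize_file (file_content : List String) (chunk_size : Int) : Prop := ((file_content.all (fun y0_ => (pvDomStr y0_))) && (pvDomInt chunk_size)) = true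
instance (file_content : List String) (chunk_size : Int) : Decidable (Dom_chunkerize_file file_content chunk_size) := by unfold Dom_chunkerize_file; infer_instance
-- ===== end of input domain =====

-- B replaces A's two-pass build-chunks-then-mutate-and-pop structure by a single comprehension
-- driven by the arithmetic full-chunk count len(file_content) // chunk_size (objective: simpler).

-- ===== PORT A =====
-- the while loop: append file_content[idx:end] and continue from end = min(idx + chunk_size, len);
-- the hypothesis hcs mirrors the assert A has already executed and only serves termination
def pvBuildChunks (fc : List String) (cs : Int) (hcs : 1 < cs) (idx : Int) : List (List String) :=
  if idx < (fc.length : Int) then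
    PySem.List.slice fc (some idx) (some (min (idx + cs) (fc.length : Int))) ::
      pvBuildChunks fc cs hcs (min (idx + cs) (fc.length : Int))
  else []
termination_by ((fc.length : Int) - idx).toNat
decreasing_by omega

-- the for loop over chunks: a short chunk is popped and the loop breaks; a full chunk
-- (length ≥ chunk_size ≥ 2, hence nonempty) becomes (chunk[:-1], chunk[-1]);
-- chunk[-1] is ported as pyGetD with default "" — exact here since the chunk is nonempty
def pvProcChunks (cs : Int) : List (List String) → List (List String × String)
  | [] => []
  | c :: rest =>
    if (c.length : Int) < cs then []
    else (PySem.List.slice c none (some (-1)), PySem.List.pyGetD c (-1) "") :: pvProcChunks cs rest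

def chunkerize_file (file_content : List String) (chunk_size : Int) : List (List String × String) :=
  if hcs : 1 < chunk_size then
    pvProcChunks chunk_size (pvBuildChunks file_content chunk_size hcs 0)
  else []  -- assert chunk_size > 1 fails: excluded by Pre_

-- ===== PORT B =====
def chunkerize_file_alt (file_content : List String) (chunk_size : Int) : List (List String × String) :=
  if 1 < chunk_size then
    (PySem.List.pyRange 0 (PySem.Int.floordiv (file_content.length : Int) chunk_size) 1).map
      (fun i =>
        (PySem.List.slice file_content (some (i * chunk_size)) (some ((i + 1) * chunk_size - 1)),
         PySem.List.pyGetD file_content ((i + 1) * chunk_size - 1) ""))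
  else []  -- assert chunk_size > 1 fails: excluded by Pre_

-- ===== PRECONDITION & SPEC =====
-- A (and B) raise AssertionError exactly when chunk_size ≤ 1; no other input raises.
def Pre_chunkerize_file (file_content : List String) (chunk_size : Int) : Prop := 1 < chunk_size
instance (file_content : List String) (chunk_size : Int) : Decidable (Pre_chunkerize_file file_content chunk_size) := by unfold Pre_chunkerize_file; infer_instance

def pvWitness_chunkerize_file : List String × Int := (["a", "b", "c", "d", "e"], 2)

def Spec_chunkerize_file (file_content : List String) (chunk_size : Int) (out : List (List String × String)) : Prop := out = chunkerize_file_alt file_content chunk_size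
instance (file_content : List String) (chunk_size : Int) (out : List (List String × String)) : Decidable (Spec_chunkerize_file file_content chunk_size out) := by unfold Spec_chunkerize_file; infer_instance

-- ===== CLAIM (what is proved, stated in full; the proofs are below) =====
def Claim_equal_chunkerize_file : Prop := ∀ (file_content : List String) (chunk_size : Int), Dom_chunkerize_file file_content chunk_size → Pre_chunkerize_file file_content chunk_size → Spec_chunkerize_file file_content chunk_size (chunkerize_file file_content chunk_size)

-- ===== LEMMAS AND PROOFS =====

-- proof-side Nat view of A's chunk-building loop: split L into consecutive k-blocks
def pvChunksNat (k : Nat) (hk : 0 < k) (L : List String) : List (List String) :=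
  if L = [] then [] else L.take k :: pvChunksNat k hk (L.drop k)
termination_by L.length
decreasing_by simp_all [List.length_drop]; cases L <;> simp_all

-- A's while loop produces exactly the k-blocks of the remaining suffix
lemma pvBuild_eq_chunksNat (fc : List String) (cs : Int) (hcs : 1 < cs) (d : Nat) :
    pvBuildChunks fc cs hcs (d : Int) = pvChunksNat cs.toNat (by omega) (fc.drop d) := by
  have hk2 : 2 ≤ cs.toNat := by omega
  suffices H : ∀ n (d : Nat), fc.length - d ≤ n →
      pvBuildChunks fc cs hcs (d : Int) = pvChunksNat cs.toNat (by omega) (fc.drop d) from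
    H (fc.length) d (by omega)
  intro n
  induction n with
  | zero =>
    intro d hd
    rw [pvBuildChunks, if_neg (by omega), pvChunksNat,
      if_pos (by simp; omega)]
  | succ n ih =>
    intro d hd
    rw [pvBuildChunks, pvChunksNat]
    by_cases hlt : (d : Int) < (fc.length : Int)
    · rw [if_pos hlt, if_neg (by simp; omega)]
      have hmin : min ((d : Int) + cs) (fc.length : Int) = ((min (d + cs.toNat) fc.length : Nat) : Int) := by
        push_cast; omega
      congr 1
      · rw [hmin, PySem.List.slice_natCast]
        rcases Nat.le_total (d + cs.toNat) fc.length with h | h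
        · congr 1; omega
        · rw [Nat.min_eq_right h]
          rw [List.take_of_length_le (by simp)]
          exact (List.take_of_length_le (by simp; omega)).symm
      · rw [hmin, ih (min (d + cs.toNat) fc.length) (by omega)]
        congr 1
        rcases Nat.le_total (d + cs.toNat) fc.length with h | h
        · rw [Nat.min_eq_left h, List.drop_drop]
        · rw [Nat.min_eq_right h, List.drop_of_length_le le_rfl,
            List.drop_drop, List.drop_of_length_le (by omega)]
    · rw [if_neg hlt, if_pos (by simp; omega)]

-- A's second loop over the k-blocks yields the indexed (prefix, target) pairs
lemma pvProc_chunksNat (cs : Int) (hcs : 1 < cs) (L : List String) :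
    pvProcChunks cs (pvChunksNat cs.toNat (by omega) L) =
      (List.range (L.length / cs.toNat)).map
        (fun i => ((L.drop (i * cs.toNat)).take (cs.toNat - 1), L.getD (i * cs.toNat + (cs.toNat - 1)) "")) := by
  have hk2 : 2 ≤ cs.toNat := by omega
  set k := cs.toNat with hkdef
  suffices H : ∀ n (L : List String), L.length ≤ n →
      pvProcChunks cs (pvChunksNat k (by omega) L) =
        (List.range (L.length / k)).map
          (fun i => ((L.drop (i * k)).take (k - 1), L.getD (i * k + (k - 1)) "")) from
    H L.length L le_rfl
  intro n
  induction n with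
  | zero =>
    intro L hL
    have : L = [] := List.length_eq_zero_iff.mp (Nat.le_zero.mp hL)
    subst this
    rw [pvChunksNat]
    simp [pvProcChunks, Nat.zero_div]
  | succ n ih =>
    intro L hL
    rw [pvChunksNat]
    by_cases hnil : L = []
    · subst hnil; simp [pvProcChunks, Nat.zero_div]
    · rw [if_neg hnil]
      by_cases hlen : L.length < k
      · -- short final chunk: popped by A; B's quotient is 0
        have htk : (L.take k).length = L.length := by simp; omega
        rw [pvProcChunks, if_pos (by rw [htk]; exact_mod_cast (by omega : (L.length : Int) < cs))]
        have : L.length / k = 0 := Nat.div_eq_of_lt hlen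
        simp [this]
      · rw [not_lt] at hlen
        have htk : (L.take k).length = k := by simp; omega
        rw [pvProcChunks, if_neg (by rw [htk]; omega)]
        have hne : L.take k ≠ [] := by intro h; have := congrArg List.length h; simp [htk] at this; omega
        have hhead : (PySem.List.slice (L.take k) none (some (-1)), PySem.List.pyGetD (L.take k) (-1) "") =
            ((L.drop (0 * k)).take (k - 1), L.getD (0 * k + (k - 1)) "") := by
          rw [Prod.mk.injEq]
          constructor
          · rw [PySem.List.slice_to_neg_one]
            rw [List.dropLast_eq_take, htk, List.take_take]
            simp
          · rw [PySem.List.pyGetD_neg_one (L.take k) "" hne, List.getLast_eq_getElem]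
            simp only [htk]
            rw [List.getElem_take]
            simp [List.getD_eq_getElem?_getD, List.getElem?_eq_getElem (by omega : k - 1 < L.length)]
        have hdl : (L.drop k).length ≤ n := by simp; omega
        rw [ih (L.drop k) hdl]
        have hq : L.length / k = (L.drop k).length / k + 1 := by
          simp only [List.length_drop]
          rw [Nat.div_eq_sub_div (by omega) hlen]
        rw [hq, List.range_succ_eq_map, List.map_cons, hhead, List.map_map]
        congr 1
        apply List.map_congr_left
        intro i _
        simp only [Function.comp_apply]
        rw [Prod.mk.injEq]
        constructor
        · rw [List.drop_drop]
          congr 2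
          simp only [Nat.succ_eq_add_one, Nat.add_mul, Nat.one_mul]
          omega
        · rw [List.getD_eq_getElem?_getD, List.getD_eq_getElem?_getD, List.getElem?_drop]
          have hidx : k + (i * k + (k - 1)) = i.succ * k + (k - 1) := by
            simp only [Nat.succ_eq_add_one, Nat.add_mul, Nat.one_mul]
            omega
          rw [hidx]

-- B's comprehension, rewritten over Nat indices
lemma pvAlt_eq (fc : List String) (cs : Int) (hcs : 1 < cs) :
    chunkerize_file_alt fc cs =
      (List.range (fc.length / cs.toNat)).map
        (fun i => ((fc.drop (i * cs.toNat)).take (cs.toNat - 1), fc.getD (i * cs.toNat + (cs.toNat - 1)) "")) := by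
  unfold chunkerize_file_alt
  rw [if_pos hcs]
  have hcseq : cs = ((cs.toNat : Nat) : Int) := by omega
  rw [hcseq, PySem.Int.floordiv_natCast, PySem.List.pyRange_one, List.map_map]
  simp only [Int.sub_zero, Int.toNat_natCast]
  apply List.map_congr_left
  intro i _
  simp only [Function.comp_apply, zero_add]
  have hk : 2 ≤ cs.toNat := by omega
  rw [Prod.mk.injEq]
  refine ⟨?_, ?_⟩
  · have h1 : (i:Int) * cs.toNat = ((i * cs.toNat : Nat) : Int) := by push_cast; ring
    have h2 : ((i:Int) + 1) * cs.toNat - 1 = ((i * cs.toNat + (cs.toNat - 1) : Nat) : Int) := by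
      push_cast [Nat.cast_sub (by omega : 1 ≤ cs.toNat)]; ring
    rw [h1, h2, PySem.List.slice_natCast]
    congr 1; omega
  · have h2 : ((i:Int) + 1) * cs.toNat - 1 = ((i * cs.toNat + (cs.toNat - 1) : Nat) : Int) := by
      push_cast [Nat.cast_sub (by omega : 1 ≤ cs.toNat)]; ring
    rw [h2, PySem.List.pyGetD_natCast]

-- ===== VERDICT (by name: the statement is the Claim_ definition above) =====
theorem chunkerize_file_spec : Claim_equal_chunkerize_file := by
  intro fc cs _ hcs
  have hcs' : 1 < cs := hcs
  unfold Spec_chunkerize_file chunkerize_file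
  rw [dif_pos hcs']
  have h0 := pvBuild_eq_chunksNat fc cs hcs' 0
  simp only [Nat.cast_zero, List.drop_zero] at h0
  rw [h0, pvProc_chunksNat cs hcs', pvAlt_eq fc cs hcs']
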